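-- pv_equiv track=rewrite | github.com/vamsi200/FKeyLogger | src/template_gen.py | generate_condition
-- ===== SOURCE A (Python) =====
-- def group_minor_values(minors):
--     minors = sorted(set(minors))
--     if not minors:
--         return []
--     ranges = []
--     start = end = minors[0]
--     for m in minors[1:]:
--         if m == end + 1:
--             end = m
--         else:
--             ranges.append((start, end))
--             start = end = m
--     ranges.append((start, end))
--     return ranges
--
-- def generate_condition(grouped):
--     conds = []
--     for major, minor_list in grouped.items():
--         ranges = group_minor_values(minor_list)
--         for r_start, r_end in ranges:
--             if r_start == r_end:
--                 conds.append(f"(major == {major} && minor == {r_start})")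
--             else:
--                 conds.append(f"(major == {major} && minor >= {r_start} && minor <= {r_end})")
--     return " || \\\n    ".join(conds)
-- ===== SOURCE B (Python) =====
-- def _runs(xs):
--     # xs: sorted distinct ints; build runs back-to-front by structural recursion
--     if not xs:
--         return []
--     rest = _runs(xs[1:])
--     x = xs[0]
--     if rest and rest[0][0] == x + 1:
--         return [(x, rest[0][1])] + rest[1:]
--     return [(x, x)] + rest
--
-- def generate_condition(grouped):
--     conds = [
--         f"(major == {major} && minor == {a})" if a == b
--         else f"(major == {major} && minor >= {a} && minor <= {b})"
--         for major, minors in grouped.items()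
--         for a, b in _runs(sorted(set(minors)))
--     ]
--     return " || \\\n    ".join(conds)
-- ===== Notes on version B (the rewrite author's own statement) =====
-- stated objective: alternative
-- what changed: A's imperative start/end-accumulator loop for grouping consecutive minors is replaced by a structural recursion that builds the runs back-to-front by merging each element into the head run, and A's nested append loops over conds are replaced by a flat comprehension.
import Mathlib
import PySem

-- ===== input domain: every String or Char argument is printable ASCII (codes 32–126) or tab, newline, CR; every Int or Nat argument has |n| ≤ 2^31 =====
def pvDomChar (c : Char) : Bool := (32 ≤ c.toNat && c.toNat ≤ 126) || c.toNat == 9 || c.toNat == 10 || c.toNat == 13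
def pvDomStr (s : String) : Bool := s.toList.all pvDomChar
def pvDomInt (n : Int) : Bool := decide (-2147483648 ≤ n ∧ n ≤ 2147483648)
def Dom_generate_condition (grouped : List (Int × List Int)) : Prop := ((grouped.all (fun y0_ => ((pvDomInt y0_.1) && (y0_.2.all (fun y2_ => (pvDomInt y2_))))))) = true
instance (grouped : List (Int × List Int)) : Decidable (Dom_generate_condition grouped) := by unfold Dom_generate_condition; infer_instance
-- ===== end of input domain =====

-- B replaces A's imperative start/end-accumulator grouping loop by a structural recursion that
-- builds the runs back-to-front, and the nested append loops by a flat comprehension (flatMap/map).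

-- shared rendering of one condition string (both Pythons' f-strings, with A's singleton/range branch)
def condStr (major a b : Int) : String :=
  if a = b then
    "(major == " ++ PySem.Int.toStr major ++ " && minor == " ++ PySem.Int.toStr a ++ ")"
  else
    "(major == " ++ PySem.Int.toStr major ++ " && minor >= " ++ PySem.Int.toStr a ++
      " && minor <= " ++ PySem.Int.toStr b ++ ")"

-- ===== PORT A =====
-- group_minor_values: sorted(set(minors)); then the loop with state (start, end, ranges)
def group_minor_values (minors : List Int) : List (Int × Int) :=
  let ms := PySem.List.sorted (PySem.Set.ofList minors) (fun x => x) false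
  match ms with
  | [] => []
  | m0 :: rest =>
    let st := rest.foldl
      (fun (st : Int × Int × List (Int × Int)) m =>
        if m = st.2.1 + 1 then (st.1, m, st.2.2)
        else (m, m, st.2.2 ++ [(st.1, st.2.1)]))
      (m0, m0, [])
    st.2.2 ++ [(st.1, st.2.1)]

def generate_condition (grouped : List (Int × List Int)) : String :=
  let conds := grouped.foldl
    (fun conds p =>
      (group_minor_values p.2).foldl (fun cs r => cs ++ [condStr p.1 r.1 r.2]) conds)
    []
  PySem.Str.join " || \\\n    " conds

-- ===== PORT B =====
-- _runs: structural recursion, runs built back-to-front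
def bRuns : List Int → List (Int × Int)
  | [] => []
  | x :: t =>
    match bRuns t with
    | (a, b) :: rs => if a = x + 1 then (x, b) :: rs else (x, x) :: (a, b) :: rs
    | [] => [(x, x)]

def generate_condition_alt (grouped : List (Int × List Int)) : String :=
  let conds := grouped.flatMap
    (fun p =>
      (bRuns (PySem.List.sorted (PySem.Set.ofList p.2) (fun x => x) false)).map
        (fun r => condStr p.1 r.1 r.2))
  PySem.Str.join " || \\\n    " conds

-- ===== PRECONDITION & SPEC =====
def Spec_generate_condition (grouped : List (Int × List Int)) (out : String) : Prop := out = generate_condition_alt grouped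
instance (grouped : List (Int × List Int)) (out : String) : Decidable (Spec_generate_condition grouped out) := by unfold Spec_generate_condition; infer_instance

-- ===== CLAIM (what is proved, stated in full; the proofs are below) =====
def Claim_equal_generate_condition : Prop := ∀ (grouped : List (Int × List Int)), Dom_generate_condition grouped → Spec_generate_condition grouped (generate_condition grouped)



-- ===== LEMMAS AND PROOFS =====

-- A's loop step (the lambda in group_minor_values, named for the lemmas)
def aStep (st : Int × Int × List (Int × Int)) (m : Int) : Int × Int × List (Int × Int) :=
  if m = st.2.1 + 1 then (st.1, m, st.2.2)
  else (m, m, st.2.2 ++ [(st.1, st.2.1)])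

-- merging a pending (s,e) run into the head of a run list (B's head-merge rule)
def mergeHead (s e : Int) (r : List (Int × Int)) : List (Int × Int) :=
  match r with
  | (a, b) :: rs => if a = e + 1 then (s, b) :: rs else (s, e) :: (a, b) :: rs
  | [] => [(s, e)]

-- B's recursion is the head-merge of the tail's runs
theorem bRuns_cons (x : Int) (t : List Int) :
    bRuns (x :: t) = mergeHead x x (bRuns t) := by
  cases hr : bRuns t with
  | nil => simp only [bRuns]; rw [hr]; rfl
  | cons p rs =>
    obtain ⟨a, b⟩ := p
    simp only [bRuns]; rw [hr]
    by_cases ha : a = x + 1 <;> simp [mergeHead, ha]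

-- merging a pending run that extends into an already-merged successor run
theorem mergeHead_merge (s e : Int) (r : List (Int × Int)) :
    mergeHead s e (mergeHead (e + 1) (e + 1) r) = mergeHead s (e + 1) r := by
  cases r with
  | nil => simp [mergeHead]
  | cons p rs =>
    obtain ⟨a, b⟩ := p
    by_cases ha : a = e + 1 + 1 <;> simp [mergeHead, ha]

-- a pending run that does not extend the next one is emitted as is
theorem mergeHead_cons_of_ne (s e m : Int) (r : List (Int × Int)) (h : ¬ m = e + 1) :
    mergeHead s e (mergeHead m m r) = (s, e) :: mergeHead m m r := by
  cases r with
  | nil => simp [mergeHead, h]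
  | cons p rs =>
    obtain ⟨a, b⟩ := p
    by_cases ha : a = m + 1 <;> simp [mergeHead, ha, h]

-- the accumulator of A's loop only ever grows on the left
theorem aStep_acc_pull (t : List Int) (s e : Int) (acc : List (Int × Int)) :
    t.foldl aStep (s, e, acc) =
      ((t.foldl aStep (s, e, [])).1, (t.foldl aStep (s, e, [])).2.1,
        acc ++ (t.foldl aStep (s, e, [])).2.2) := by
  induction t generalizing s e acc with
  | nil => simp
  | cons m t ih =>
    simp only [List.foldl_cons, aStep]
    by_cases h : m = e + 1
    · rw [if_pos h, if_pos h]; exact ih s m acc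
    · rw [if_neg h, if_neg h, ih m m (acc ++ [(s, e)]), ih m m ([] ++ [(s, e)])]
      simp

-- A's loop, finished by appending the pending run, is the head-merge of B's recursion
theorem aLoop_eq_mergeHead (t : List Int) (s e : Int) :
    (t.foldl aStep (s, e, [])).2.2 ++
        [((t.foldl aStep (s, e, [])).1, (t.foldl aStep (s, e, [])).2.1)] =
      mergeHead s e (bRuns t) := by
  induction t generalizing s e with
  | nil => rfl
  | cons m t ih =>
    simp only [List.foldl_cons, aStep]
    rw [bRuns_cons]
    by_cases h : m = e + 1
    · rw [if_pos h, ih, h, mergeHead_merge]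
    · rw [if_neg h, show ([] : List (Int × Int)) ++ [(s, e)] = [(s, e)] from rfl,
          aStep_acc_pull t m m [(s, e)]]
      simp only [List.singleton_append]
      rw [mergeHead_cons_of_ne s e m (bRuns t) h, ← ih m m, List.cons_append]

-- per minor list: A's grouping equals B's recursion on sorted(set(...))
theorem group_eq_bRuns (minors : List Int) :
    group_minor_values minors =
      bRuns (PySem.List.sorted (PySem.Set.ofList minors) (fun x => x) false) := by
  unfold group_minor_values
  cases hs : PySem.List.sorted (PySem.Set.ofList minors) (fun x => x) false with
  | nil => rfl
  | cons m0 rest =>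
    show (rest.foldl aStep (m0, m0, [])).2.2 ++
        [((rest.foldl aStep (m0, m0, [])).1, (rest.foldl aStep (m0, m0, [])).2.1)] =
      bRuns (m0 :: rest)
    rw [aLoop_eq_mergeHead, bRuns_cons]

-- the whole conds list: A's nested append loops equal B's flat comprehension
theorem conds_eq (grouped : List (Int × List Int)) (acc : List String) :
    grouped.foldl
        (fun conds p =>
          (group_minor_values p.2).foldl (fun cs r => cs ++ [condStr p.1 r.1 r.2]) conds)
        acc =
      acc ++ grouped.flatMap
        (fun p =>
          (bRuns (PySem.List.sorted (PySem.Set.ofList p.2) (fun x => x) false)).map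
            (fun r => condStr p.1 r.1 r.2)) := by
  induction grouped generalizing acc with
  | nil => simp
  | cons p t ih =>
    simp only [List.foldl_cons, List.flatMap_cons]
    rw [PySem.List.foldl_append_singleton_eq_map, group_eq_bRuns, ih, List.append_assoc]

-- ===== VERDICT (by name: the statement is the Claim_ definition above) =====
theorem generate_condition_spec : Claim_equal_generate_condition := by
  intro grouped _
  unfold Spec_generate_condition generate_condition generate_condition_alt
  rw [conds_eq]
  rfl
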